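-- pv_equiv track=rewrite | github.com/marzikill/NSI | Bloc2-algorithmique/BoulzagueGrosValetPicard-cours_k_plus_proches_voisins/pyfiles/terrain.py | tri_avec_indices
-- ===== SOURCE A (Python) =====
-- def tri_avec_indices(l):
--     # On trie (selection parce que la flemme de faire dans la
--     # dentelle) le tableau l en conservant en mémoire
--     # la trace des permutations effectuées.
--     permutation = list(range(len(l)))
--     for i in range(len(l)):
--         currentmin = l[i]
--         indexmin = i
--         for j in range(i, len(l)):
--             if l[j] < currentmin:
--                 currentmin = l[j]
--                 indexmin = j
--         l[i], l[indexmin] = currentmin, l[i]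
--         permutation[i], permutation[indexmin] = permutation[indexmin], permutation[i]
--     return permutation, l
-- ===== SOURCE B (Python) =====
-- # Sort the index list once with the built-in stable sort instead of scanning
-- # for a minimum on every pass.  Sorts l in place, like the original.
--
-- def tri_avec_indices(l):
--     perm = sorted(range(len(l)), key=lambda j: l[j])
--     l[:] = [l[j] for j in perm]
--     return perm, l
-- ===== Notes on version B (the rewrite author's own statement) =====
-- stated objective: faster
-- what changed: A runs an O(n^2) selection sort, re-scanning the suffix for its minimum and swapping both the list and the index trace; B sorts the index list once with the built-in stable sort and rebuilds the list from it. Pre_ excludes lists with duplicate elements, on which A's permutation tie-order is an accident of its swap sequence.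
-- outside the precondition, e.g. on tri_avec_indices([1, 1, 0]): A returns ([2, 1, 0], [0, 1, 1]), B returns ([2, 0, 1], [0, 1, 1])
import Mathlib
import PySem

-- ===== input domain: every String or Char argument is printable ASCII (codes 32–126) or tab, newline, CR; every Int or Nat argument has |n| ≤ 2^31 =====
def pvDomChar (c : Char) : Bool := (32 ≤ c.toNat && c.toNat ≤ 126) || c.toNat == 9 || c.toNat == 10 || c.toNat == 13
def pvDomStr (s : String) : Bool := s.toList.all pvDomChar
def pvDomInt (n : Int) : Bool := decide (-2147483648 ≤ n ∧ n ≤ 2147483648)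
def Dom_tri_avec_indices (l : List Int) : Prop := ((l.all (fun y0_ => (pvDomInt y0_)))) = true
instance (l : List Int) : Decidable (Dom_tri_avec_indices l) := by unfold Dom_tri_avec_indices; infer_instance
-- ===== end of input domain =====

-- B replaces A's O(n^2) selection sort by one stable sort of the index list
-- (objective: faster, asymptotic).  Both A and B sort the argument list in
-- place in Python; the theorems below are about the returned pair.

-- ===== PORT A =====
-- inner loop 'for j in range(i, len(l)): if l[j] < currentmin: …'
-- (indices are always in range, so l[j] is l.getD j 0 exactly)
def pvScan (l : List Int) (i : Nat) : Int × Nat :=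
  (List.range' i (l.length - i)).foldl
    (fun st j => if l.getD j 0 < st.1 then (l.getD j 0, j) else st)
    (l.getD i 0, i)

-- one iteration of A's outer loop: the two simultaneous swap-assignments,
-- right-hand sides evaluated first, targets assigned left to right
def pvStepA (st : List Int × List Int) (i : Nat) : List Int × List Int :=
  match st with
  | (perm, l) =>
    let r := pvScan l i
    let currentmin := r.1
    let indexmin := r.2
    let li := l.getD i 0
    let l' := (l.set i currentmin).set indexmin li
    let pi := perm.getD i 0
    let pm := perm.getD indexmin 0
    let perm' := (perm.set i pm).set indexmin pi
    (perm', l')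

def tri_avec_indices (l : List Int) : List Int × List Int :=
  let n := l.length
  let permutation := (List.range n).map (fun (j : Nat) => (j : Int))
  let res := (List.range n).foldl pvStepA (permutation, l)
  (res.1, res.2)

-- ===== PORT B =====
-- 'sorted(range(len(l)), key=lambda j: l[j])' then '[l[j] for j in perm]';
-- j comes from range(len(l)), so l[j] is in range and pyGetD is exact
def tri_avec_indices_alt (l : List Int) : List Int × List Int :=
  let perm := PySem.List.sorted (PySem.List.pyRange 0 (l.length : Int) 1)
                (fun j => PySem.List.pyGetD l j 0) false
  let out := perm.map (fun j => PySem.List.pyGetD l j 0)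
  (perm, out)

-- ===== PRECONDITION & SPEC =====
-- Pre_ excludes lists with duplicate elements: there the sorted list is still the
-- same, but A's returned permutation orders tied elements by an accident of its
-- swap sequence while B's stable sort orders them by original position.
def Pre_tri_avec_indices (l : List Int) : Prop := l.Nodup
instance (l : List Int) : Decidable (Pre_tri_avec_indices l) := by unfold Pre_tri_avec_indices; infer_instance
def pvWitness_tri_avec_indices : List Int := [3, 1, 2]

def Spec_tri_avec_indices (l : List Int) (out : List Int × List Int) : Prop := out = tri_avec_indices_alt l
instance (l : List Int) (out : List Int × List Int) : Decidable (Spec_tri_avec_indices l out) := by unfold Spec_tri_avec_indices; infer_instance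

-- ===== CLAIM (what is proved, stated in full; the proofs are below) =====
def Claim_equal_tri_avec_indices : Prop := ∀ (l : List Int), Dom_tri_avec_indices l → Pre_tri_avec_indices l → Spec_tri_avec_indices l (tri_avec_indices l)

-- ===== LEMMAS AND PROOFS =====

-- the inner scan over range' a c, started below a, computes the minimum
lemma pvScanGo (l : List Int) :
    ∀ (c a : Nat) (st : Int × Nat), st.2 < a →
      (((List.range' a c).foldl
          (fun st j => if l.getD j 0 < st.1 then (l.getD j 0, j) else st) st) = st ∨
        (a ≤ ((List.range' a c).foldl
          (fun st j => if l.getD j 0 < st.1 then (l.getD j 0, j) else st) st).2 ∧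
         ((List.range' a c).foldl
          (fun st j => if l.getD j 0 < st.1 then (l.getD j 0, j) else st) st).2 < a + c ∧
         ((List.range' a c).foldl
          (fun st j => if l.getD j 0 < st.1 then (l.getD j 0, j) else st) st).1 =
           l.getD ((List.range' a c).foldl
          (fun st j => if l.getD j 0 < st.1 then (l.getD j 0, j) else st) st).2 0 ∧
         ((List.range' a c).foldl
          (fun st j => if l.getD j 0 < st.1 then (l.getD j 0, j) else st) st).1 < st.1)) ∧
      (∀ j, a ≤ j → j < a + c →
        (((List.range' a c).foldl
          (fun st j => if l.getD j 0 < st.1 then (l.getD j 0, j) else st) st).1 < l.getD j 0 ∨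
         (((List.range' a c).foldl
          (fun st j => if l.getD j 0 < st.1 then (l.getD j 0, j) else st) st).1 = l.getD j 0 ∧
          ((List.range' a c).foldl
          (fun st j => if l.getD j 0 < st.1 then (l.getD j 0, j) else st) st).2 ≤ j))) := by
  intro c
  induction c with
  | zero => intro a st h; exact ⟨Or.inl rfl, fun j hj1 hj2 => absurd (lt_of_le_of_lt hj1 hj2) (by omega)⟩
  | succ c ih =>
    intro a st hst
    rw [List.range'_succ, List.foldl_cons]
    by_cases hlt : l.getD a 0 < st.1
    · rw [if_pos hlt]
      obtain ⟨h1, h2⟩ := ih (a + 1) (l.getD a 0, a) (by omega)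
      constructor
      · rcases h1 with h1 | ⟨h1a, h1b, h1c, h1d⟩
        · right; rw [h1]; exact ⟨by omega, by omega, rfl, hlt⟩
        · right; exact ⟨by omega, by omega, h1c, lt_trans h1d hlt⟩
      · intro j hj1 hj2
        rcases Nat.eq_or_lt_of_le hj1 with rfl | hj1'
        · rcases h1 with h1 | ⟨h1a, h1b, h1c, h1d⟩
          · rw [h1]; right; exact ⟨rfl, le_refl _⟩
          · left; exact h1d
        · exact h2 j (by omega) (by omega)
    · rw [if_neg hlt]
      obtain ⟨h1, h2⟩ := ih (a + 1) st (by omega)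
      constructor
      · rcases h1 with h1 | ⟨h1a, h1b, h1c, h1d⟩
        · exact Or.inl h1
        · right; exact ⟨by omega, by omega, h1c, h1d⟩
      · intro j hj1 hj2
        rcases Nat.eq_or_lt_of_le hj1 with rfl | hj1'
        · rcases h1 with h1 | ⟨h1a, h1b, h1c, h1d⟩
          · rw [h1]
            rcases lt_or_eq_of_le (not_lt.mp hlt) with h | h
            · left; exact h
            · right; exact ⟨h, by omega⟩
          · left; exact lt_of_lt_of_le h1d (not_lt.mp hlt)
        · exact h2 j (by omega) (by omega)

-- characterization of A's inner loop: leftmost minimum of l over [i, n)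
lemma pvScan_spec (l : List Int) (i : Nat) (hi : i < l.length) :
    (i ≤ (pvScan l i).2 ∧ (pvScan l i).2 < l.length) ∧
    (pvScan l i).1 = l.getD (pvScan l i).2 0 ∧
    (∀ j, i ≤ j → j < l.length → (pvScan l i).1 ≤ l.getD j 0) := by
  obtain ⟨c, hc⟩ : ∃ c, l.length - i = c + 1 := ⟨l.length - i - 1, by omega⟩
  have hlen : l.length = i + (c + 1) := by omega
  unfold pvScan
  rw [hc, List.range'_succ, List.foldl_cons, if_neg (lt_irrefl _)]
  obtain ⟨h1, h2⟩ := pvScanGo l c (i + 1) (l.getD i 0, i) (by omega)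
  refine ⟨?_, ?_, ?_⟩
  · rcases h1 with h1 | ⟨h1a, h1b, h1c, h1d⟩
    · rw [h1]; exact ⟨le_refl _, by omega⟩
    · exact ⟨by omega, by omega⟩
  · rcases h1 with h1 | ⟨h1a, h1b, h1c, h1d⟩
    · rw [h1]
    · exact h1c
  · intro j hj1 hj2
    rcases Nat.eq_or_lt_of_le hj1 with rfl | hj1'
    · rcases h1 with h1 | ⟨h1a, h1b, h1c, h1d⟩
      · rw [h1]
      · exact le_of_lt h1d
    · rcases h2 j (by omega) (by omega) with h | ⟨h, _⟩
      · exact le_of_lt h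
      · exact le_of_eq h

lemma getD_set_ne (l : List Int) (i j : Nat) (v : Int) (h : i ≠ j) :
    (l.set j v).getD i 0 = l.getD i 0 := by
  simp [List.getD_eq_getElem?_getD, List.getElem?_set_ne (Ne.symm h)]
lemma getD_set_self (l : List Int) (j : Nat) (v : Int) (h : j < l.length) :
    (l.set j v).getD j 0 = v := by
  simp [List.getD_eq_getElem?_getD, h]
-- extracting an entry: x_j :: (x with position j overwritten by a) ~ a :: x
lemma cons_set_perm {α : Type} (t : List α) : ∀ (j : Nat) (a : α) (h : j < t.length),
    (t[j] :: t.set j a).Perm (a :: t) := by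
  induction t with
  | nil => intro j a h; simp at h
  | cons b s ih =>
    intro j a h
    cases j with
    | zero => simpa using List.Perm.swap a b s
    | succ j =>
      have h' : j < s.length := by simpa using h
      exact (List.Perm.swap b s[j] (s.set j a)).trans
        (((ih j a h').cons b).trans (List.Perm.swap a b s))

-- a two-position swap is a permutation of the original list
lemma swap_set_perm {α : Type} [Inhabited α] (d : α) :
    ∀ (x : List α) (i m : Nat), i < x.length → m < x.length →
    ((x.set i (x.getD m d)).set m (x.getD i d)).Perm x := by
  intro x
  induction x with
  | nil => intro i m hi hm; simp at hi
  | cons a t ih =>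
    intro i m hi hm
    cases i with
    | zero =>
      cases m with
      | zero => simp
      | succ k =>
        have hk : k < t.length := by simpa using hm
        rw [List.getD_cons_succ, List.getD_cons_zero, List.getD_eq_getElem t d hk]
        show (t[k] :: t.set k a).Perm (a :: t)
        exact cons_set_perm t k a hk
    | succ k =>
      cases m with
      | zero =>
        have hk : k < t.length := by simpa using hi
        rw [List.getD_cons_zero, List.getD_cons_succ, List.getD_eq_getElem t d hk]
        show (t[k] :: t.set k a).Perm (a :: t)
        exact cons_set_perm t k a hk
      | succ j =>
        have hk : k < t.length := by simpa using hi
        have hj : j < t.length := by simpa using hm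
        rw [List.getD_cons_succ, List.getD_cons_succ]
        show (a :: (t.set k (t.getD j d)).set j (t.getD k d)).Perm (a :: t)
        exact (ih k j hk hj).cons a

-- the loop invariant of A's outer loop after i passes: lengths, the index trace
-- stays a rearrangement of range(n), l[j] is the original element at perm[j],
-- and the processed prefix is in place
def pvInvA (l0 : List Int) (i : Nat) (st : List Int × List Int) : Prop :=
  st.2.length = l0.length ∧
  st.1.Perm (PySem.List.pyRange 0 (l0.length : Int) 1) ∧
  (∀ j, j < l0.length → st.2.getD j 0 = l0.getD (st.1.getD j 0).toNat 0) ∧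
  (∀ a b, a < i → a < b → b < l0.length → st.2.getD a 0 ≤ st.2.getD b 0)

lemma pvInvA_init (l0 : List Int) :
    pvInvA l0 0 ((List.range l0.length).map (fun (j : Nat) => (j : Int)), l0) := by
  refine ⟨rfl, ?_, ?_, fun a b ha => absurd ha (by omega)⟩
  · rw [show PySem.List.pyRange 0 (l0.length : Int) 1
        = (List.range l0.length).map (fun (j : Nat) => (j : Int))
      from PySem.List.pyRange_zero_natCast l0.length]
  · intro j hj
    have hj' : j < ((List.range l0.length).map (fun (j : Nat) => (j : Int))).length := by
      simpa using hj
    have : ((List.range l0.length).map (fun (j : Nat) => (j : Int))).getD j 0 = (j : Int) := by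
      rw [List.getD_eq_getElem _ _ hj', List.getElem_map, List.getElem_range]
    rw [this, Int.toNat_natCast]

lemma pvInvA_step (l0 : List Int) (i : Nat) (perm l : List Int)
    (hi : i < l0.length) (inv : pvInvA l0 i (perm, l)) :
    pvInvA l0 (i + 1) (pvStepA (perm, l) i) := by
  obtain ⟨hlen, hperm, hlink, hsort⟩ := inv
  simp only at hlen hperm hlink hsort
  have hplen : perm.length = l0.length := by
    have h := hperm.length_eq
    rw [PySem.List.length_pyRange_one] at h
    simpa using h
  have hiA : i < l.length := by omega
  obtain ⟨⟨hm1, hm2⟩, hm3, hm4⟩ := pvScan_spec l i hiA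
  set m := (pvScan l i).2 with hmdef
  show pvInvA l0 (i + 1)
    ((perm.set i (perm.getD m 0)).set m (perm.getD i 0),
     (l.set i (pvScan l i).1).set m (l.getD i 0))
  set l' := (l.set i (pvScan l i).1).set m (l.getD i 0) with hl'
  set perm' := (perm.set i (perm.getD m 0)).set m (perm.getD i 0) with hp'
  have hl'len : l'.length = l0.length := by simp [hl', hlen]
  have hlsetlen : (l.set i (pvScan l i).1).length = l.length := by simp
  have hpsetlen : (perm.set i (perm.getD m 0)).length = perm.length := by simp
  refine ⟨hl'len, ?_, ?_, ?_⟩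
  · exact ((swap_set_perm 0 perm i m (by omega) (by omega)).trans hperm)
  · -- linkage
    intro j hj
    by_cases hjm : j = m
    · have e1 : l'.getD j 0 = l.getD i 0 := by
        rw [hl', hjm, getD_set_self _ _ _ (by rw [hlsetlen]; omega)]
      have e2 : perm'.getD j 0 = perm.getD i 0 := by
        rw [hp', hjm, getD_set_self _ _ _ (by rw [hpsetlen]; omega)]
      rw [e1, e2]; exact hlink i hi
    · by_cases hji : j = i
      · subst hji
        have e1 : l'.getD j 0 = l.getD m 0 := by
          rw [hl', getD_set_ne _ _ _ _ hjm, getD_set_self _ _ _ hiA, hm3]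
        have e2 : perm'.getD j 0 = perm.getD m 0 := by
          rw [hp', getD_set_ne _ _ _ _ hjm, getD_set_self _ _ _ (by omega)]
        rw [e1, e2]; exact hlink m (by omega)
      · have e1 : l'.getD j 0 = l.getD j 0 := by
          rw [hl', getD_set_ne _ _ _ _ hjm, getD_set_ne _ _ _ _ hji]
        have e2 : perm'.getD j 0 = perm.getD j 0 := by
          rw [hp', getD_set_ne _ _ _ _ hjm, getD_set_ne _ _ _ _ hji]
        rw [e1, e2]; exact hlink j hj
  · -- prefix sortedness
    have hval : ∀ b, i ≤ b → b < l0.length →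
        ∃ c, i ≤ c ∧ c < l0.length ∧ l'.getD b 0 = l.getD c 0 := by
      intro b hb1 hb2
      by_cases hbm : b = m
      · refine ⟨i, le_refl i, hi, ?_⟩
        rw [hl', hbm, getD_set_self _ _ _ (by rw [hlsetlen]; omega)]
      · by_cases hbi : b = i
        · refine ⟨m, hm1, by omega, ?_⟩
          rw [hl', hbi, getD_set_ne _ _ _ _ (by rw [← hbi]; exact hbm),
            getD_set_self _ _ _ hiA, hm3]
        · exact ⟨b, hb1, hb2, by
            rw [hl', getD_set_ne _ _ _ _ hbm, getD_set_ne _ _ _ _ hbi]⟩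
    have hpre : ∀ a, a < i → l'.getD a 0 = l.getD a 0 := by
      intro a ha
      rw [hl', getD_set_ne _ _ _ _ (by omega), getD_set_ne _ _ _ _ (by omega)]
    have hmin : l'.getD i 0 = (pvScan l i).1 := by
      by_cases him : i = m
      · rw [hl', show m = i from him.symm,
          getD_set_self _ _ _ (by rw [hlsetlen]; omega), hm3, ← him]
      · rw [hl', getD_set_ne _ _ _ _ him, getD_set_self _ _ _ hiA]
    intro a b ha hab hb
    by_cases hai : a < i
    · by_cases hbi : b < i
      · rw [hpre a hai, hpre b hbi]; exact hsort a b hai hab hb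
      · obtain ⟨c, hc1, hc2, hc3⟩ := hval b (by omega) hb
        rw [hpre a hai, hc3]
        exact hsort a c hai (by omega) hc2
    · have ha' : a = i := by omega
      subst ha'
      obtain ⟨c, hc1, hc2, hc3⟩ := hval b (by omega) hb
      rw [hmin, hc3]
      exact hm4 c hc1 (by omega)

lemma pvFoldA_inv (l0 : List Int) : ∀ (c i : Nat) (st : List Int × List Int),
    pvInvA l0 i st → i + c = l0.length →
    pvInvA l0 l0.length ((List.range' i c).foldl pvStepA st) := by
  intro c
  induction c with
  | zero =>
    intro i st h hic
    have : i = l0.length := by omega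
    subst this
    simpa using h
  | succ c ih =>
    intro i st h hic
    rw [List.range'_succ, List.foldl_cons]
    obtain ⟨perm, l⟩ := st
    exact ih (i + 1) _ (pvInvA_step l0 i perm l (by omega) h) (by omega)

-- ===== VERDICT (by name: the statement is the Claim_ definition above) =====
theorem tri_avec_indices_spec : Claim_equal_tri_avec_indices := by
  intro l _hdom hpre
  have hnl : l.Nodup := hpre
  unfold Spec_tri_avec_indices
  set F := (List.range l.length).foldl pvStepA
      ((List.range l.length).map (fun (j : Nat) => (j : Int)), l) with hFdef
  have hinv : pvInvA l l.length F := by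
    have h := pvFoldA_inv l l.length 0
      ((List.range l.length).map (fun (j : Nat) => (j : Int)), l) (pvInvA_init l) (by omega)
    rw [← List.range_eq_range'] at h
    exact h
  obtain ⟨hlen, hperm, hlink, hsort⟩ := hinv
  have hplen : F.1.length = l.length := by
    have h := hperm.length_eq
    rw [PySem.List.length_pyRange_one] at h
    simpa using h
  have hmem : ∀ x ∈ F.1, 0 ≤ x ∧ x < (l.length : Int) := by
    intro x hx
    have := hperm.mem_iff.mp hx
    simpa using PySem.List.mem_pyRange_one.mp this
  have hnodupF : F.1.Nodup := hperm.nodup_iff.mpr (PySem.List.nodup_pyRange_one 0 _)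
  have hkey : ∀ (a : Nat) (ha : a < F.1.length),
      PySem.List.pyGetD l (F.1[a]) 0 = F.2.getD a 0 := by
    intro a ha
    obtain ⟨h0, h1⟩ := hmem _ (List.getElem_mem ha)
    have hlt : (F.1[a]).toNat < l.length := by omega
    rw [PySem.List.pyGetD_eq_getElem l 0 h0 (by exact_mod_cast h1),
      hlink a (by omega), List.getD_eq_getElem F.1 0 ha,
      List.getD_eq_getElem l 0 hlt]
  have hpair : List.Pairwise
      (fun x y => PySem.List.pyGetD l x 0 < PySem.List.pyGetD l y 0) F.1 := by
    rw [List.pairwise_iff_getElem]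
    intro a b ha hb hab
    have hle : F.2.getD a 0 ≤ F.2.getD b 0 := hsort a b (by omega) hab (by omega)
    rw [hkey a ha, hkey b hb]
    rcases lt_or_eq_of_le hle with h | h
    · exact h
    · exfalso
      rw [← hkey a ha, ← hkey b hb] at h
      obtain ⟨ha0, ha1⟩ := hmem _ (List.getElem_mem ha)
      obtain ⟨hb0, hb1⟩ := hmem _ (List.getElem_mem hb)
      rw [PySem.List.pyGetD_eq_getElem l 0 ha0 (by exact_mod_cast ha1),
        PySem.List.pyGetD_eq_getElem l 0 hb0 (by exact_mod_cast hb1)] at h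
      have hidx : (F.1[a]).toNat = (F.1[b]).toNat := (hnl.getElem_inj_iff).mp h
      have hFeq : F.1[a] = F.1[b] := by omega
      exact absurd ((hnodupF.getElem_inj_iff).mp hFeq) (by omega)
  have hsorted_eq : PySem.List.sorted (PySem.List.pyRange 0 (l.length : Int) 1)
      (fun j => PySem.List.pyGetD l j 0) false = F.1 :=
    PySem.List.sorted_eq_of_perm_of_pairwise_lt _ _ _ hperm hpair
  have hout : F.2 = F.1.map (fun j => PySem.List.pyGetD l j 0) := by
    apply List.ext_getElem
    · rw [List.length_map, hplen, hlen]
    · intro j h1 h2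
      have h1' : j < F.1.length := by
        rw [List.length_map] at h2; exact h2
      rw [List.getElem_map, hkey j h1', List.getD_eq_getElem F.2 0 h1]
  have hA : tri_avec_indices l = (F.1, F.2) := rfl
  have hB : tri_avec_indices_alt l =
      (PySem.List.sorted (PySem.List.pyRange 0 (l.length : Int) 1)
        (fun j => PySem.List.pyGetD l j 0) false,
       (PySem.List.sorted (PySem.List.pyRange 0 (l.length : Int) 1)
        (fun j => PySem.List.pyGetD l j 0) false).map
          (fun j => PySem.List.pyGetD l j 0)) := rfl
  rw [hA, hB, hsorted_eq, ← hout]
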